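-- pv_equiv track=rewrite | github.com/synthiumjp/koriat | collect_saturation.py | count_tokens_in_think_block
-- ===== SOURCE A (Python) =====
-- def count_tokens_in_think_block(tokens: list, raw_response: str) -> int:
--     """
--     Rough count of how many response tokens fall inside <think>...</think>.
--     Simple approach: count tokens up to and including </think> marker.
--     For a more precise count, reconcile token offsets with character positions.
--     """
--     if "<think>" not in raw_response or "</think>" not in raw_response:
--         return 0
--     # Reconstruct character offsets for each token
--     cumulative = ""
--     start_idx = None
--     end_idx = None
--     for i, tok in enumerate(tokens):
--         cumulative += tok
--         if start_idx is None and "<think>" in cumulative: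
--             start_idx = i
--         if end_idx is None and "</think>" in cumulative:
--             end_idx = i
--             break
--     if start_idx is None or end_idx is None:
--         return 0
--     return max(0, end_idx - start_idx)
-- ===== SOURCE B (Python) =====
-- def count_tokens_in_think_block(tokens: list, raw_response: str) -> int:
--     """Find the marker positions once in the joined token string, then map the
--     two character offsets to token indices in a single length-summing pass
--     (instead of searching a growing cumulative string at every token)."""
--     if "<think>" not in raw_response or "</think>" not in raw_response:
--         return 0
--     joined = "".join(tokens)
--     ep = joined.find("</think>")
--     if ep == -1:
--         return 0
--     sp = joined.find("<think>")
--     idx_s = None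
--     total = 0
--     for i, tok in enumerate(tokens):
--         total += len(tok)
--         if idx_s is None and sp != -1 and total >= sp + 7:
--             idx_s = i
--         if total >= ep + 8:
--             return i - idx_s if idx_s is not None else 0
--     return 0
-- ===== Notes on version B (the rewrite author's own statement) =====
-- stated objective: alternative
-- what changed: B joins the tokens once, locates each marker with a single str.find, and converts the two character offsets to token indices in one length-summing pass, instead of A's per-token rebuilding of a growing cumulative string with a substring search in it at every step; on random inputs without the markers both exit at the initial guard, so no speed-up was measured.
import Mathlib
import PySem

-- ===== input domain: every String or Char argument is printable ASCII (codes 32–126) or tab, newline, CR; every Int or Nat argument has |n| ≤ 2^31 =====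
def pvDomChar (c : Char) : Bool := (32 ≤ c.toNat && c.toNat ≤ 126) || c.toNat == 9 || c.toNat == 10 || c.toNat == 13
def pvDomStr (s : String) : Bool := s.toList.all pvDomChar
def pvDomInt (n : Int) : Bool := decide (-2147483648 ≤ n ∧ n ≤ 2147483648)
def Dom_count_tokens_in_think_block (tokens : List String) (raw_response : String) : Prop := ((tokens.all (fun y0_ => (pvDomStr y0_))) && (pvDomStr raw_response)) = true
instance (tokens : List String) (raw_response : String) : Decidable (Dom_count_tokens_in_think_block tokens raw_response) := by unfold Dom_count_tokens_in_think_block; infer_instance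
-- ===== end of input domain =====

-- B finds the two markers once in the joined token string and maps their character
-- offsets to token indices by a single length-summing pass, instead of A's growing
-- cumulative string with a substring search per token (objective: alternative).

def pvThink : List Char := "<think>".toList
def pvEndThink : List Char := "</think>".toList

-- ===== PORT A =====
-- the 'for i, tok in enumerate(tokens)' loop with its early break; state = (cumulative, start_idx)
def pvALoop (toks : List String) (i : Nat) (cum : List Char) (start? : Option Int) :
    Option Int × Option Int :=
  match toks with
  | [] => (start?, none)
  | tok :: rest =>
    let cum' := cum ++ tok.toList
    let start?' := if start?.isNone && PySem.Chars.isIn pvThink cum' then some (i : Int) else start?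
    if PySem.Chars.isIn pvEndThink cum' then (start?', some (i : Int))
    else pvALoop rest (i + 1) cum' start?'

def count_tokens_in_think_block (tokens : List String) (raw_response : String) : Int :=
  if !(PySem.Str.isIn "<think>" raw_response) || !(PySem.Str.isIn "</think>" raw_response) then 0
  else
    match pvALoop tokens 0 [] none with
    | (some s, some e) => max 0 (e - s)
    | _ => 0

-- ===== PORT B =====
-- Source B's single pass over token lengths; sp/ep are the find() results on the joined string
def pvBLoop (toks : List String) (i total : Nat) (sp ep : Int) (idx_s : Option Nat) : Int :=
  match toks with
  | [] => 0
  | tok :: rest =>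
    let total' := total + tok.toList.length
    let idx_s' := if idx_s.isNone && !(sp == -1) && decide (sp + 7 ≤ (total' : Int)) then some i else idx_s
    if ep + 8 ≤ (total' : Int) then
      match idx_s' with
      | some s => (i : Int) - (s : Int)
      | none => 0
    else pvBLoop rest (i + 1) total' sp ep idx_s'

def count_tokens_in_think_block_alt (tokens : List String) (raw_response : String) : Int :=
  if !(PySem.Str.isIn "<think>" raw_response) || !(PySem.Str.isIn "</think>" raw_response) then 0
  else
    let joined := PySem.Chars.join [] (tokens.map String.toList)
    let ep := PySem.Chars.find joined pvEndThink
    if ep = -1 then 0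
    else
      let sp := PySem.Chars.find joined pvThink
      pvBLoop tokens 0 0 sp ep none

-- ===== PRECONDITION & SPEC =====
def Spec_count_tokens_in_think_block (tokens : List String) (raw_response : String) (out : Int) : Prop := out = count_tokens_in_think_block_alt tokens raw_response
instance (tokens : List String) (raw_response : String) (out : Int) : Decidable (Spec_count_tokens_in_think_block tokens raw_response out) := by unfold Spec_count_tokens_in_think_block; infer_instance

-- ===== CLAIM (what is proved, stated in full; the proofs are below) =====
def Claim_equal_count_tokens_in_think_block : Prop := ∀ (tokens : List String) (raw_response : String), Dom_count_tokens_in_think_block tokens raw_response → Spec_count_tokens_in_think_block tokens raw_response (count_tokens_in_think_block tokens raw_response)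

-- ===== LEMMAS AND PROOFS =====

-- a substring occurs in a prefix of J iff its first occurrence in J ends within that prefix
lemma pv_isIn_take_iff (J sub : List Char) (m : Nat) :
    PySem.Chars.isIn sub (J.take m) = true ↔
      0 ≤ PySem.Chars.find J sub ∧ PySem.Chars.find J sub + (sub.length : Int) ≤ (m : Int) := by
  constructor
  · intro h
    by_cases hnil : sub = []
    · subst hnil
      simp [PySem.Chars.find_nil]
    obtain ⟨j, hj⟩ := (PySem.Chars.exists_prefix_drop_iff_isIn sub (J.take m)).2 h
    rw [List.drop_take] at hj
    have hsub : sub <+: J.drop j ∧ sub.length ≤ m - j := List.prefix_take_iff.1 hj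
    have hin : PySem.Chars.isIn sub J = true :=
      (PySem.Chars.exists_prefix_drop_iff_isIn sub J).1 ⟨j, hsub.1⟩
    have hnn : 0 ≤ PySem.Chars.find J sub := (PySem.Chars.find_nonneg_iff J sub).2
      ((PySem.Chars.isIn_iff_infix sub J).1 hin)
    refine ⟨hnn, ?_⟩
    have hmin := (PySem.Chars.find_spec hnn).2
    have hfle : (PySem.Chars.find J sub).toNat ≤ j := by
      by_contra hlt
      exact hmin j (by omega) hsub.1
    have hjm : sub.length + j ≤ m := by
      by_cases hjm' : j ≤ m
      · omega
      · exfalso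
        have hz : m - j = 0 := by omega
        rw [hz] at hj
        simp at hj
        exact hnil hj
    omega
  · rintro ⟨hnn, hle⟩
    have hspec := (PySem.Chars.find_spec hnn).1
    have hp : sub <+: (J.drop (PySem.Chars.find J sub).toNat).take (m - (PySem.Chars.find J sub).toNat) :=
      List.prefix_take_iff.2 ⟨hspec, by omega⟩
    rw [← List.drop_take] at hp
    exact (PySem.Chars.exists_prefix_drop_iff_isIn sub (J.take m)).1
      ⟨(PySem.Chars.find J sub).toNat, hp⟩

-- Bool form of the same fact
lemma pv_isIn_take_bool (J sub : List Char) (m : Nat) :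
    PySem.Chars.isIn sub (J.take m) =
      (!(PySem.Chars.find J sub == -1) &&
        decide (PySem.Chars.find J sub + (sub.length : Int) ≤ (m : Int))) := by
  have hm1 := PySem.Chars.neg_one_le_find J sub
  rw [Bool.eq_iff_iff]
  simp only [pv_isIn_take_iff, Bool.and_eq_true, Bool.not_eq_true', beq_eq_false_iff_ne,
    ne_eq, decide_eq_true_eq]
  constructor
  · rintro ⟨h1, h2⟩; exact ⟨by omega, h2⟩
  · rintro ⟨h1, h2⟩; exact ⟨by omega, h2⟩

-- the two loops agree, given cum is the consumed prefix of J and the end marker occurs in J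
lemma pv_loop_eq (J : List Char) (hep : 0 ≤ PySem.Chars.find J pvEndThink) :
    ∀ (rest : List String) (i : Nat) (cum : List Char) (idx_s : Option Nat),
      cum ++ (rest.map String.toList).flatten = J →
      (∀ s, idx_s = some s → s ≤ i) →
      (match pvALoop rest i cum (idx_s.map (fun n => (n : Int))) with
        | (some s, some e) => max 0 (e - s)
        | _ => 0) =
      pvBLoop rest i cum.length (PySem.Chars.find J pvThink) (PySem.Chars.find J pvEndThink) idx_s := by
  intro rest
  induction rest with
  | nil =>
    intro i cum idx_s hJ hinv
    cases idx_s <;> simp [pvALoop, pvBLoop]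
  | cons tok rest ih =>
    intro i cum idx_s hJ hinv
    have hJ' : (cum ++ tok.toList) ++ (rest.map String.toList).flatten = J := by
      simpa [List.append_assoc] using hJ
    have hcum' : J.take (cum ++ tok.toList).length = cum ++ tok.toList := by
      rw [← hJ']; exact List.take_left
    have hlen : (cum ++ tok.toList).length = cum.length + tok.toList.length := by
      simp
    have hstart : PySem.Chars.isIn pvThink (cum ++ tok.toList) =
        (!(PySem.Chars.find J pvThink == -1) &&
          decide (PySem.Chars.find J pvThink + 7 ≤ ((cum.length + tok.toList.length : Nat) : Int))) := by
      rw [← hcum', pv_isIn_take_bool, hlen]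
      have h7 : ((pvThink.length : Nat) : Int) = 7 := by decide
      rw [h7]
    have hend : PySem.Chars.isIn pvEndThink (cum ++ tok.toList) =
        decide (PySem.Chars.find J pvEndThink + 8 ≤ ((cum.length + tok.toList.length : Nat) : Int)) := by
      rw [← hcum', pv_isIn_take_bool, hlen]
      have hne : (!(PySem.Chars.find J pvEndThink == -1)) = true := by
        simp only [Bool.not_eq_true', beq_eq_false_iff_ne, ne_eq]; omega
      rw [hne]
      have h8 : ((pvEndThink.length : Nat) : Int) = 8 := by decide
      rw [h8, Bool.true_and]
    simp only [pvALoop, pvBLoop]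
    have hisNone : (idx_s.map (fun n => (n : Int))).isNone = idx_s.isNone := by
      cases idx_s <;> rfl
    rw [hstart, hend, hisNone]
    simp only [← Bool.and_assoc]
    by_cases hbrk : PySem.Chars.find J pvEndThink + 8 ≤ ((cum.length + tok.toList.length : Nat) : Int)
    · rw [if_pos (decide_eq_true hbrk), if_pos hbrk]
      by_cases hst : ((idx_s.isNone && !(PySem.Chars.find J pvThink == -1)) &&
          decide (PySem.Chars.find J pvThink + 7 ≤ ((cum.length + tok.toList.length : Nat) : Int))) = true
      · rw [if_pos hst, if_pos hst]
        simp
      · rw [if_neg hst, if_neg hst]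
        cases idx_s with
        | none => rfl
        | some s =>
          have hs := hinv s rfl
          show max 0 ((i : Int) - (s : Int)) = (i : Int) - (s : Int)
          rw [max_eq_right (by omega)]
    · rw [if_neg (fun h => hbrk (of_decide_eq_true h)), if_neg hbrk]
      by_cases hst : ((idx_s.isNone && !(PySem.Chars.find J pvThink == -1)) &&
          decide (PySem.Chars.find J pvThink + 7 ≤ ((cum.length + tok.toList.length : Nat) : Int))) = true
      · rw [if_pos hst, if_pos hst]
        have := ih (i + 1) (cum ++ tok.toList) (some i) hJ'
          (by intro s hs; cases hs; omega)
        rw [hlen] at this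
        exact this
      · rw [if_neg hst, if_neg hst]
        have := ih (i + 1) (cum ++ tok.toList) idx_s hJ'
          (by intro s hs; have := hinv s hs; omega)
        rw [hlen] at this
        exact this

lemma pv_join_flatten (xs : List (List Char)) : PySem.Chars.join [] xs = xs.flatten := by
  simp only [PySem.Chars.join]
  induction xs with
  | nil => rfl
  | cons h t ih =>
    cases t <;> simp_all [List.intercalate]

-- if the end marker never occurs in J, A's loop never breaks (second component stays none)
lemma pv_loop_no_end (J : List Char) (hep : PySem.Chars.find J pvEndThink = -1) :
    ∀ (rest : List String) (i : Nat) (cum : List Char) (s? : Option Int),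
      cum ++ (rest.map String.toList).flatten = J →
      (pvALoop rest i cum s?).2 = none := by
  intro rest
  induction rest with
  | nil => intro i cum s? _; simp [pvALoop]
  | cons tok rest ih =>
    intro i cum s? hJc
    have hJ' : (cum ++ tok.toList) ++ (rest.map String.toList).flatten = J := by
      simpa [List.append_assoc] using hJc
    have hcum' : J.take (cum ++ tok.toList).length = cum ++ tok.toList := by
      rw [← hJ']; exact List.take_left
    have hnin : PySem.Chars.isIn pvEndThink (cum ++ tok.toList) = false := by
      rw [← hcum', pv_isIn_take_bool]
      simp [hep]
    simp only [pvALoop, hnin, Bool.false_eq_true, if_false]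
    exact ih (i + 1) (cum ++ tok.toList) _ hJ'

-- ===== VERDICT (by name: the statement is the Claim_ definition above) =====
theorem count_tokens_in_think_block_spec : Claim_equal_count_tokens_in_think_block := by
  intro tokens raw_response _
  unfold Spec_count_tokens_in_think_block
  unfold count_tokens_in_think_block count_tokens_in_think_block_alt
  rcases Bool.eq_false_or_eq_true
      (!(PySem.Str.isIn "<think>" raw_response) || !(PySem.Str.isIn "</think>" raw_response))
      with hg | hg
  · rw [hg]
    rfl
  · rw [hg]
    simp only [Bool.false_eq_true, if_false]
    set J := PySem.Chars.join [] (tokens.map String.toList) with hJdef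
    have hJ : J = (tokens.map String.toList).flatten := by
      rw [hJdef, pv_join_flatten]
    by_cases hep : PySem.Chars.find J pvEndThink = -1
    · rw [if_pos hep]
      have key := pv_loop_no_end J hep tokens 0 [] none (by simpa using hJ.symm)
      rcases h : pvALoop tokens 0 [] none with ⟨s?, e?⟩
      rw [h] at key
      cases s? <;> simp_all
    · rw [if_neg hep]
      have hep' : 0 ≤ PySem.Chars.find J pvEndThink := by
        have := PySem.Chars.neg_one_le_find J pvEndThink
        omega
      have := pv_loop_eq J hep' tokens 0 [] none (by simpa using hJ.symm)
        (by intro s hs; cases hs)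
      simpa using this
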